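-- pv_equiv track=rewrite | github.com/ajones239/PySourceCodeSec | labeller.py | cred_vars_present
-- ===== SOURCE A (Python) =====
-- def cred_vars_present(line):
--     keywords = {
--         "pass",
--         "p@ass",
--         "pwd",
--         "login",
--         "user",
--         "acct",
--         "account",
--         "email",
--         "e-mail",
--         "name",
--         "credentials"
--     }
--     for keyword in keywords:
--         if len(keyword) > len(line):
--             continue
--         for i in range(0, len(line) - len(keyword) + 1):
--             if line[i:i+len(keyword)].lower() == keyword:
--                 return 1
--     return 0
-- ===== SOURCE B (Python) =====
-- import re
--
-- _KEYWORDS = {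
--     "pass",
--     "p@ass",
--     "pwd",
--     "login",
--     "user",
--     "acct",
--     "account",
--     "email",
--     "e-mail",
--     "name",
--     "credentials",
-- }
--
-- _PATTERN = re.compile("|".join(re.escape(k) for k in _KEYWORDS), re.IGNORECASE)
--
--
-- def cred_vars_present(line):
--     return 1 if _PATTERN.search(line) else 0
-- ===== Notes on version B (the rewrite author's own statement) =====
-- stated objective: faster
-- what changed: Replaces A's per-keyword sliding-window double loop of Python-level slice/lower/compare with one precompiled case-insensitive alternation regex (re.escape-joined keywords) searched once over the line by the C regex engine.
import Mathlib
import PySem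

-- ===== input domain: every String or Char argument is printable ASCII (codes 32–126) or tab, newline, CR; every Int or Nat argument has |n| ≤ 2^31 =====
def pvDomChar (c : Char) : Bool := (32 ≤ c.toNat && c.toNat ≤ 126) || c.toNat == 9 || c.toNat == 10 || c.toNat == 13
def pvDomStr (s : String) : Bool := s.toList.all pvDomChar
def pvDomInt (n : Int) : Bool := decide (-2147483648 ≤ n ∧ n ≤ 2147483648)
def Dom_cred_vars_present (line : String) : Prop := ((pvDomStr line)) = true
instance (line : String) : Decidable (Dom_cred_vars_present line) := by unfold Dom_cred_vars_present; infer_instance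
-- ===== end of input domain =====

-- B replaces A's keyword-by-keyword sliding-window double loop with one compiled
-- case-insensitive alternation regex searched once over the line (objective: faster; measured).


-- ===== PORT A =====
-- A iterates a Python set of keyword literals; the 1/0 result does not depend on the
-- iteration order, so the set is ported as the literal list.
def credKeywordsA : List String :=
  ["pass", "p@ass", "pwd", "login", "user", "acct", "account",
   "email", "e-mail", "name", "credentials"]

-- inner loop: for i in range(0, len(line) - len(keyword) + 1): if line[i:i+len(keyword)].lower() == keyword
def credWindowHit (line : List Char) (kw : List Char) : Bool :=
  (PySem.List.pyRange 0 ((line.length : Int) - (kw.length : Int) + 1)).any fun i =>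
    PySem.Chars.lower (PySem.List.slice line (some i) (some (i + (kw.length : Int)))) == kw

-- outer loop over the keywords, with A's 'continue' guard and early 'return 1'
def credScanKeywords (line : List Char) : List (List Char) → Int
  | [] => 0
  | kw :: rest =>
      if kw.length > line.length then credScanKeywords line rest
      else if credWindowHit line kw then 1 else credScanKeywords line rest

def cred_vars_present (line : String) : Int :=
  credScanKeywords line.toList (credKeywordsA.map String.toList)

-- ===== PORT B =====
def credKeywordsB : List String :=
  ["pass", "p@ass", "pwd", "login", "user", "acct", "account",
   "email", "e-mail", "name", "credentials"]

-- Hand port of re.search on the compiled pattern (re has no PySem primitive).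
-- The pattern is an IGNORECASE alternation of escaped literals, so the engine's
-- behaviour is exact here: at a position, try each alternative literal
-- character by character, case-insensitively; search tries positions left to right.
def reLitMatch : List Char → List Char → Bool
  | [], _ => true
  | _ :: _, [] => false
  | k :: ks, c :: cs => (PySem.Chars.lowerChar c == k) && reLitMatch ks cs

def reAltSearch (alts : List (List Char)) : List Char → Bool
  | [] => alts.any fun kw => reLitMatch kw []
  | c :: cs => (alts.any fun kw => reLitMatch kw (c :: cs)) || reAltSearch alts cs

def cred_vars_present_alt (line : String) : Int :=
  if reAltSearch (credKeywordsB.map String.toList) line.toList then 1 else 0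

-- ===== PRECONDITION & SPEC =====
def Spec_cred_vars_present (line : String) (out : Int) : Prop := out = cred_vars_present_alt line
instance (line : String) (out : Int) : Decidable (Spec_cred_vars_present line out) := by unfold Spec_cred_vars_present; infer_instance

-- ===== CLAIM (what is proved, stated in full; the proofs are below) =====
def Claim_equal_cred_vars_present : Prop := ∀ (line : String), Dom_cred_vars_present line → Spec_cred_vars_present line (cred_vars_present line)

-- ===== LEMMAS AND PROOFS =====

-- B's literal matcher at one position is prefix-of-the-lowercased-suffix.
theorem reLitMatch_iff (kw cs : List Char) :
    reLitMatch kw cs = true ↔ kw <+: cs.map PySem.Chars.lowerChar := by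
  induction kw generalizing cs with
  | nil => simp [reLitMatch]
  | cons k ks ih =>
    cases cs with
    | nil => simp [reLitMatch]
    | cons c cs' =>
      simp only [reLitMatch, Bool.and_eq_true, beq_iff_eq, List.map_cons,
        List.cons_prefix_cons, ih]
      constructor <;> rintro ⟨h1, h2⟩ <;> exact ⟨h1.symm, h2⟩

-- B's search is: some alternative is an infix of the lowercased line.
theorem reAltSearch_iff (alts : List (List Char)) (s : List Char) :
    reAltSearch alts s = true ↔ ∃ kw ∈ alts, kw <:+: s.map PySem.Chars.lowerChar := by
  induction s with
  | nil =>
    simp [reAltSearch, List.any_eq_true, reLitMatch_iff]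
  | cons c cs ih =>
    simp only [reAltSearch, Bool.or_eq_true, List.any_eq_true, reLitMatch_iff, ih,
      List.map_cons, List.infix_cons_iff]
    constructor
    · rintro (⟨kw, hm, h⟩ | ⟨kw, hm, h⟩)
      · exact ⟨kw, hm, Or.inl h⟩
      · exact ⟨kw, hm, Or.inr h⟩
    · rintro ⟨kw, hm, h | h⟩
      · exact Or.inl ⟨kw, hm, h⟩
      · exact Or.inr ⟨kw, hm, h⟩

-- A's sliding window for one keyword is also infix-of-the-lowercased-line.
theorem credWindowHit_iff (line kw : List Char) :
    credWindowHit line kw = true ↔ kw <:+: line.map PySem.Chars.lowerChar := by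
  unfold credWindowHit
  simp only [List.any_eq_true, PySem.List.mem_pyRange_one, beq_iff_eq]
  constructor
  · rintro ⟨i, ⟨h0, hi⟩, heq⟩
    obtain ⟨j, rfl⟩ := Int.eq_ofNat_of_zero_le h0
    rw [PySem.List.slice_natCast_add] at heq
    have hpre : kw <+: (line.map PySem.Chars.lowerChar).drop j := by
      rw [← heq]
      simp only [PySem.Chars.lower, List.map_take, List.map_drop]
      exact List.take_prefix _ _
    exact List.infix_iff_prefix_suffix.mpr ⟨_, hpre, List.drop_suffix _ _⟩
  · intro h
    obtain ⟨t, hpre, hsuf⟩ := List.infix_iff_prefix_suffix.mp h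
    have ht : t = (line.map PySem.Chars.lowerChar).drop
        ((line.map PySem.Chars.lowerChar).length - t.length) :=
      List.suffix_iff_eq_drop.mp hsuf
    have hkl : kw.length ≤ t.length := hpre.length_le
    have htl : t.length ≤ line.length := by simpa using hsuf.length_le
    refine ⟨((line.length - t.length : Nat) : Int), ⟨by positivity, by omega⟩, ?_⟩
    rw [PySem.List.slice_natCast_add]
    simp only [PySem.Chars.lower, List.map_take, List.map_drop]
    have ht' : (line.map PySem.Chars.lowerChar).drop (line.length - t.length) = t := by
      rw [ht]; simp; omega
    rw [ht']
    exact (List.prefix_iff_eq_take.mp hpre).symm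

-- A's outer loop returns 1 iff some listed keyword is an infix of the lowercased line.
theorem credScanKeywords_eq (line : List Char) (kws : List (List Char)) :
    credScanKeywords line kws =
      if kws.any (fun kw => credWindowHit line kw) then 1 else 0 := by
  induction kws with
  | nil => simp [credScanKeywords]
  | cons kw rest ih =>
    by_cases hlen : kw.length > line.length
    · have hhit : credWindowHit line kw = false := by
        rw [Bool.eq_false_iff]
        intro hc
        have hle := ((credWindowHit_iff line kw).mp hc).length_le
        simp at hle
        omega
      simp [credScanKeywords, hlen, hhit, ih]
    · simp only [credScanKeywords, if_neg hlen]
      cases h : credWindowHit line kw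
      · simp [h, ih]
      · simp [h]

-- ===== VERDICT (by name: the statement is the Claim_ definition above) =====
theorem cred_vars_present_spec : Claim_equal_cred_vars_present := by
  intro line _
  unfold Spec_cred_vars_present cred_vars_present cred_vars_present_alt
  rw [credScanKeywords_eq]
  have : reAltSearch (credKeywordsB.map String.toList) line.toList =
      (credKeywordsA.map String.toList).any (fun kw => credWindowHit line.toList kw) := by
    cases h : reAltSearch (credKeywordsB.map String.toList) line.toList
    · symm
      rw [Bool.eq_false_iff] at h ⊢
      intro hc
      apply h
      rw [reAltSearch_iff]
      obtain ⟨kw, hm, hk⟩ := List.any_eq_true.mp hc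
      exact ⟨kw, hm, (credWindowHit_iff _ _).mp hk⟩
    · symm
      obtain ⟨kw, hm, hk⟩ := (reAltSearch_iff _ _).mp h
      exact List.any_eq_true.mpr ⟨kw, hm, (credWindowHit_iff _ _).mpr hk⟩
  rw [this]
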